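-- pv_equiv track=rewrite | github.com/fgloblek/Coding | 118E_BerttownRoads.py | dp
-- ===== SOURCE A (Python) =====
-- def flatten(S):
--     if S == []:
--         return S
--     if isinstance(S[0], list):
--         return flatten(S[0]) + flatten(S[1:])
--     return S[:1] + flatten(S[1:])
--
-- def all_children(graph,u,tree_edges):
--     children = [edge[1] for edge in tree_edges if edge[0] == u]
--     return flatten(children + [all_children(graph,v,tree_edges) for v in children])
--
-- def dp(graph, u, tree_edges, back_edges):
--     if not u:
--         return 0
--     children = [edge[1] for edge in tree_edges if edge[0] == u]
--     up_backedges = [edge for edge in back_edges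
--                     if (edge[0] == u and edge[1] not in all_children(graph, u, tree_edges))
--                     or (edge[1] == u and edge[0] not in all_children(graph, u, tree_edges))
--                     ]
--     down_backedges = [edge for edge in back_edges
--                       if (edge[0] == u and edge[1] in all_children(graph, u, tree_edges))
--                       or (edge[1] == u and edge[0] in all_children(graph, u, tree_edges))
--                       ]
--     return len(up_backedges)//2-len(down_backedges)//2 + sum(dp(graph, v, tree_edges, back_edges) for v in children)
-- ===== SOURCE B (Python) =====
-- def dp(graph, u, tree_edges, back_edges):
--     def children(w):
--         return [e[1] for e in tree_edges if e[0] == w]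
--
--     def descendants(w):
--         # bounded saturation: after len(tree_edges) rounds the set is closed
--         seen = set(children(w))
--         for _ in range(len(tree_edges)):
--             seen = seen | {e[1] for e in tree_edges if e[0] in seen}
--         return seen
--
--     def solve(w):
--         if not w:
--             return 0
--         desc = None
--         up = down = 0
--         for e in back_edges:
--             if e[0] == w or e[1] == w:
--                 if desc is None:
--                     desc = descendants(w)
--                 other = e[1] if e[0] == w else e[0]
--                 if other in desc:
--                     down += 1
--                 else:
--                     up += 1
--         return up // 2 - down // 2 + sum(solve(v) for v in children(w))
--
--     return solve(u)
-- ===== Notes on version B (the rewrite author's own statement) =====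
-- stated objective: alternative
-- what changed: B computes a node's descendant set at most once per node by a bounded set-saturation pass (and only when a back edge touches the node) and classifies back_edges in a single counting pass with two counters, instead of A's recomputation of all_children (a recursive flatten over nested child lists) for every back edge and every membership test.
import Mathlib
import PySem

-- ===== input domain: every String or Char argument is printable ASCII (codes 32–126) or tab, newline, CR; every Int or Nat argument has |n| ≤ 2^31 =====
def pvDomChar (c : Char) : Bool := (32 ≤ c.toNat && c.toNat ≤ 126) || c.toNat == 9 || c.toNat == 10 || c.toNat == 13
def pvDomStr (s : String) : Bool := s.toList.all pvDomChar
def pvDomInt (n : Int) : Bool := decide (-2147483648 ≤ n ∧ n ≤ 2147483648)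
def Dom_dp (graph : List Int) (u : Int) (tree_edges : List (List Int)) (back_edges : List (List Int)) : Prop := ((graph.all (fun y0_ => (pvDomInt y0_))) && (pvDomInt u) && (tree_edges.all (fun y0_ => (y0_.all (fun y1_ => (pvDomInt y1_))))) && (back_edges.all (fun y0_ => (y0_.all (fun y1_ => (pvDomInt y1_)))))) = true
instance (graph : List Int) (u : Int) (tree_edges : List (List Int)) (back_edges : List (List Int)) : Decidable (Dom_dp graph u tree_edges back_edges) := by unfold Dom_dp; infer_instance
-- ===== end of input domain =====

-- B computes each node's descendant set at most once (by bounded set saturation, and only when a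
-- back edge touches the node) and tallies back edges in a single counting pass, instead of A's
-- recomputation of all_children for every membership test (alternative algorithm; not measured faster).


-- ===== PORT A =====
-- e[i] for i = 0, 1; total via a default that Pre_dp keeps unreachable (Python raises IndexError there)
def eGet (e : List Int) (i : Int) : Int := (PySem.List.pyGet? e i).getD 0

-- [edge[1] for edge in tree_edges if edge[0] == w]  (this comprehension appears verbatim in A and in B)
def childrenOf (tree_edges : List (List Int)) (w : Int) : List Int :=
  (tree_edges.filter (fun e => eGet e 0 == w)).map (fun e => eGet e 1)

-- Python's untyped flatten, applied by all_children to the mixed list ints ++ lists: it yields the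
-- ints followed by the concatenation of the (already flat) inner lists; since Lean lists are
-- homogeneous the ints are carried as singleton lists, which flatten maps to themselves.
def flattenL : List (List Int) → List Int
  | [] => []
  | x :: rest => x ++ flattenL rest

-- all_children; the fuel only caps the recursion depth (tree_edges.length + 1 suffices on the inputs
-- Pre_dp admits; in Python the recursion is unbounded and diverges on a reachable cycle)
def allChildren (tree_edges : List (List Int)) : Nat → Int → List Int
  | 0, _ => []
  | f+1, u =>
    let children := childrenOf tree_edges u
    flattenL (children.map (fun c => [c]) ++ children.map (fun v => allChildren tree_edges f v))

def condUp (ac : List Int) (u : Int) (e : List Int) : Bool :=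
  (eGet e 0 == u && !(ac.contains (eGet e 1))) || (eGet e 1 == u && !(ac.contains (eGet e 0)))

def condDown (ac : List Int) (u : Int) (e : List Int) : Bool :=
  (eGet e 0 == u && ac.contains (eGet e 1)) || (eGet e 1 == u && ac.contains (eGet e 0))

def dpA (tree_edges back_edges : List (List Int)) : Nat → Int → Int
  | 0, _ => 0
  | f+1, u =>
    if u == 0 then 0 else
    let children := childrenOf tree_edges u
    let ac := allChildren tree_edges (tree_edges.length + 1) u
    let up := back_edges.filter (condUp ac u)
    let down := back_edges.filter (condDown ac u)
    PySem.Int.floordiv (up.length : Int) 2 - PySem.Int.floordiv (down.length : Int) 2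
      + (children.map (fun v => dpA tree_edges back_edges f v)).sum

def dp (graph : List Int) (u : Int) (tree_edges : List (List Int)) (back_edges : List (List Int)) : Int :=
  dpA tree_edges back_edges (tree_edges.length + 1) u

-- ===== PORT B =====
-- seen = seen | {e[1] for e in tree_edges if e[0] in seen}, iterated f times (for _ in range(...))
def satB (tree_edges : List (List Int)) : Nat → PySem.Set Int → PySem.Set Int
  | 0, seen => seen
  | f+1, seen =>
    satB tree_edges f
      (PySem.Set.union seen
        (PySem.Set.ofList ((tree_edges.filter (fun e => PySem.Set.contains seen (eGet e 0))).map
          (fun e => eGet e 1))))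

-- descendants(w)
def descend (tree_edges : List (List Int)) (w : Int) : PySem.Set Int :=
  satB tree_edges tree_edges.length (PySem.Set.ofList (childrenOf tree_edges w))

-- the single counting pass over back_edges; state = (desc : Option set — None until first needed, up, down)
def tallyLazy (tree_edges : List (List Int)) (w : Int)
    (st : Option (PySem.Set Int) × Int × Int) (e : List Int) : Option (PySem.Set Int) × Int × Int :=
  if eGet e 0 == w || eGet e 1 == w then
    let d := st.1.getD (descend tree_edges w)
    let other := if eGet e 0 == w then eGet e 1 else eGet e 0
    if PySem.Set.contains d other then (some d, st.2.1, st.2.2 + 1)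
    else (some d, st.2.1 + 1, st.2.2)
  else st

def dpB (tree_edges back_edges : List (List Int)) : Nat → Int → Int
  | 0, _ => 0
  | f+1, w =>
    if w == 0 then 0 else
    let st := back_edges.foldl (tallyLazy tree_edges w) (none, 0, 0)
    PySem.Int.floordiv st.2.1 2 - PySem.Int.floordiv st.2.2 2
      + ((childrenOf tree_edges w).map (fun v => dpB tree_edges back_edges f v)).sum

def dp_alt (graph : List Int) (u : Int) (tree_edges : List (List Int)) (back_edges : List (List Int)) : Int :=
  dpB tree_edges back_edges (tree_edges.length + 1) u

-- ===== PRECONDITION & SPEC =====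
-- heads of the well-formed (two-element) tree edges leaving x
def succWf (tes : List (List Int)) (x : Int) : List Int :=
  (tes.filter (fun e => decide (2 ≤ e.length) && (eGet e 0 == x))).map (fun e => eGet e 1)

-- k rounds of following well-formed tree edges from s; with blocked = true, edges out of node 0 are
-- not followed (Python's dp stops at a falsy node, all_children does not)
def preReach (tes : List (List Int)) (blocked : Bool) : Nat → List Int → List Int
  | 0, s => s
  | k+1, s =>
    preReach tes blocked k
      (s ++ (tes.filter (fun e =>
          decide (2 ≤ e.length) && s.contains (eGet e 0) && (!blocked || !(eGet e 0 == 0)))).map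
        (fun e => eGet e 1))

-- Pre_dp admits exactly the inputs on which Python A returns: u = 0 returns at once; otherwise every
-- back edge needs both endpoints and every tree edge a head (else IndexError), a one-element tree
-- edge may not leave a node the computation scans (dp scans the nonzero nodes Vnz reachable from u
-- stopping at 0; all_children — called only at nodes touched by a back edge — additionally scans
-- their unblocked closure F), and no directed cycle may be reachable in either scanned region
-- (else A's unbounded recursion raises RecursionError).
def Pre_dp (graph : List Int) (u : Int) (tree_edges : List (List Int)) (back_edges : List (List Int)) : Prop :=
  u = 0 ∨
  ((∀ e ∈ back_edges, 2 ≤ e.length) ∧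
   (∀ e ∈ tree_edges, 1 ≤ e.length) ∧
   (let Vnz := (preReach tree_edges true tree_edges.length [u]).filter (fun x => !(x == 0));
    let F := preReach tree_edges false tree_edges.length
      (Vnz.filter (fun v => back_edges.any (fun e => eGet e 0 == v || eGet e 1 == v)));
    (∀ e ∈ tree_edges, e.length = 1 → eGet e 0 ∉ Vnz ∧ eGet e 0 ∉ F) ∧
    (∀ x ∈ Vnz, x ∉ preReach tree_edges true tree_edges.length (succWf tree_edges x)) ∧
    (∀ x ∈ F, x ∉ preReach tree_edges false tree_edges.length (succWf tree_edges x))))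

instance (graph : List Int) (u : Int) (tree_edges : List (List Int)) (back_edges : List (List Int)) : Decidable (Pre_dp graph u tree_edges back_edges) := by unfold Pre_dp; infer_instance

def pvWitness_dp : List Int × Int × List (List Int) × List (List Int) :=
  ([], 1, [[1, 2], [2, 3]], [[3, 1], [2, 1]])

def Spec_dp (graph : List Int) (u : Int) (tree_edges : List (List Int)) (back_edges : List (List Int)) (out : Int) : Prop := out = dp_alt graph u tree_edges back_edges
instance (graph : List Int) (u : Int) (tree_edges : List (List Int)) (back_edges : List (List Int)) (out : Int) : Decidable (Spec_dp graph u tree_edges back_edges out) := by unfold Spec_dp; infer_instance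

-- ===== CLAIM (what is proved, stated in full; the proofs are below) =====
def Claim_equal_dp : Prop := ∀ (graph : List Int) (u : Int) (tree_edges : List (List Int)) (back_edges : List (List Int)), Dom_dp graph u tree_edges back_edges → Pre_dp graph u tree_edges back_edges → Spec_dp graph u tree_edges back_edges (dp graph u tree_edges back_edges)

-- ===== LEMMAS AND PROOFS =====

-- one step along a tree edge
def stepRel (tes : List (List Int)) (a b : Int) : Prop :=
  ∃ e, e ∈ tes ∧ eGet e 0 = a ∧ eGet e 1 = b

-- a path of exactly k tree-edge steps
def pathN (tes : List (List Int)) : Nat → Int → Int → Prop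
  | 0, a, b => a = b
  | k+1, a, b => ∃ c, stepRel tes a c ∧ pathN tes k c b

lemma mem_childrenOf {tes : List (List Int)} {w x : Int} :
    x ∈ childrenOf tes w ↔ stepRel tes w x := by
  simp only [childrenOf, stepRel, List.mem_map, List.mem_filter, beq_iff_eq]
  constructor
  · rintro ⟨e, ⟨he, h0⟩, h1⟩; exact ⟨e, he, h0, h1⟩
  · rintro ⟨e, he, h0, h1⟩; exact ⟨e, ⟨he, h0⟩, h1⟩

lemma mem_flattenL {L : List (List Int)} {x : Int} :
    x ∈ flattenL L ↔ ∃ l ∈ L, x ∈ l := by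
  induction L with
  | nil => simp [flattenL]
  | cons h t ih => simp [flattenL, ih]

lemma mem_allChildren {tes : List (List Int)} :
    ∀ (f : Nat) (u x : Int),
      x ∈ allChildren tes f u ↔ ∃ k, 1 ≤ k ∧ k ≤ f ∧ pathN tes k u x := by
  intro f
  induction f with
  | zero =>
    intro u x
    simp only [allChildren, List.not_mem_nil, false_iff]
    rintro ⟨k, hk1, hk0, -⟩; omega
  | succ f ih =>
    intro u x
    simp only [allChildren, mem_flattenL, List.mem_append, List.mem_map]
    constructor
    · rintro ⟨l, (⟨c, hc, rfl⟩ | ⟨c, hc, rfl⟩), hx⟩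
      · have hx' : x = c := List.mem_singleton.mp hx
        exact ⟨1, le_refl _, by omega, c, mem_childrenOf.mp hc, hx'.symm⟩
      · obtain ⟨k, hk1, hkf, hp⟩ := (ih c x).mp hx
        exact ⟨k + 1, by omega, by omega, c, mem_childrenOf.mp hc, hp⟩
    · rintro ⟨k, hk1, hkf, hp⟩
      cases k with
      | zero => omega
      | succ j =>
        obtain ⟨c, hs, hp⟩ := hp
        cases j with
        | zero =>
          have hx : c = x := hp
          subst hx
          exact ⟨[c], Or.inl ⟨c, mem_childrenOf.mpr hs, rfl⟩, List.mem_singleton.mpr rfl⟩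
        | succ j =>
          refine ⟨allChildren tes f c, Or.inr ⟨c, mem_childrenOf.mpr hs, rfl⟩, ?_⟩
          exact (ih c x).mpr ⟨j + 1, by omega, by omega, hp⟩

lemma mem_satB {tes : List (List Int)} :
    ∀ (f : Nat) (S : PySem.Set Int) (x : Int),
      x ∈ satB tes f S ↔ ∃ s ∈ S, ∃ k ≤ f, pathN tes k s x := by
  intro f
  induction f with
  | zero =>
    intro S x
    simp only [satB]
    constructor
    · intro hx; exact ⟨x, hx, 0, le_refl _, rfl⟩
    · rintro ⟨s, hs, k, hk, hp⟩
      interval_cases k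
      have hx : s = x := hp
      exact hx ▸ hs
  | succ f ih =>
    intro S x
    simp only [satB]
    rw [ih]
    constructor
    · rintro ⟨s, hs, k, hk, hp⟩
      rw [PySem.Set.mem_union, PySem.Set.mem_ofList, List.mem_map] at hs
      rcases hs with hs | ⟨e, he, rfl⟩
      · exact ⟨s, hs, k, by omega, hp⟩
      · rw [List.mem_filter] at he
        obtain ⟨het, hec⟩ := he
        have hmem : eGet e 0 ∈ S := (PySem.Set.contains_iff _ _).mp hec
        exact ⟨eGet e 0, hmem, k + 1, by omega, ⟨eGet e 1, ⟨e, het, rfl, rfl⟩, hp⟩⟩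
    · rintro ⟨s, hs, k, hk, hp⟩
      cases k with
      | zero =>
        have hx : s = x := hp
        subst hx
        exact ⟨s, by rw [PySem.Set.mem_union]; exact Or.inl hs, 0, by omega, rfl⟩
      | succ k =>
        obtain ⟨c, ⟨e, he, h0, h1⟩, hp⟩ := hp
        refine ⟨c, ?_, k, by omega, hp⟩
        rw [PySem.Set.mem_union, PySem.Set.mem_ofList, List.mem_map]
        refine Or.inr ⟨e, List.mem_filter.mpr ⟨he, ?_⟩, h1⟩
        exact (PySem.Set.contains_iff _ _).mpr (h0 ▸ hs)

-- B's saturated set has exactly the members of A's all_children list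
lemma desc_eq_ac {tes : List (List Int)} (u x : Int) :
    x ∈ descend tes u ↔ x ∈ allChildren tes (tes.length + 1) u := by
  rw [descend, mem_satB, mem_allChildren]
  constructor
  · rintro ⟨s, hs, k, hk, hp⟩
    rw [PySem.Set.mem_ofList] at hs
    exact ⟨k + 1, by omega, by omega, s, mem_childrenOf.mp hs, hp⟩
  · rintro ⟨k, hk1, hkf, hp⟩
    cases k with
    | zero => omega
    | succ k =>
      obtain ⟨c, hs, hp⟩ := hp
      refine ⟨c, ?_, k, by omega, hp⟩
      rw [PySem.Set.mem_ofList]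
      exact mem_childrenOf.mpr hs

lemma contains_eq_of_mem_iff {a b : List Int} (h : ∀ x, x ∈ a ↔ x ∈ b) (x : Int) :
    a.contains x = b.contains x := by
  by_cases hx : x ∈ b
  · simp [List.contains_iff_mem, hx, (h x).mpr hx]
  · have ha : x ∉ a := fun hxa => hx ((h x).mp hxa)
    simp [List.contains_iff_mem, hx, ha]

lemma foldl_tallyLazy {tes : List (List Int)} {ac : List Int} {w : Int}
    (h : ∀ x, (PySem.Set.contains (descend tes w) x : Bool) = ac.contains x) :
    ∀ (l : List (List Int)) (o : Option (PySem.Set Int)) (a b : Int),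
      (o = none ∨ o = some (descend tes w)) →
      (l.foldl (tallyLazy tes w) (o, a, b)).2 =
        (a + ((l.filter (condUp ac w)).length : Int),
         b + ((l.filter (condDown ac w)).length : Int)) := by
  intro l
  induction l with
  | nil => intro o a b _; simp
  | cons e t ih =>
    intro o a b ho
    have hd : o.getD (descend tes w) = descend tes w := by
      rcases ho with rfl | rfl <;> rfl
    rw [List.foldl_cons]
    by_cases h0 : eGet e 0 = w
    · by_cases h1 : eGet e 1 ∈ ac
      · have h1c : ac.contains (eGet e 1) = true := by simpa [List.contains_iff_mem] using h1
        have hup : condUp ac w e = false := by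
          by_cases h1w : eGet e 1 = w
          · simp [condUp, h0, h1w, h1w ▸ h1]
          · simp [condUp, h0, h1w, h1]
        have hdn : condDown ac w e = true := by simp [condDown, h0, h1]
        simp only [tallyLazy]
        rw [if_pos (by simp [h0]), hd, if_pos (by rw [if_pos (by simp [h0]), h, h1c])]
        rw [ih _ _ _ (Or.inr rfl)]
        rw [List.filter_cons_of_neg (by simp [hup]), List.filter_cons_of_pos (by simp [hdn])]
        simp only [Prod.mk.injEq, List.length_cons]
        constructor <;> push_cast <;> ring
      · have h1c : ac.contains (eGet e 1) = false := by simpa [List.contains_iff_mem] using h1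
        have hup : condUp ac w e = true := by simp [condUp, h0, h1]
        have hdn : condDown ac w e = false := by
          by_cases h1w : eGet e 1 = w
          · simp [condDown, h0, h1w, h1w ▸ h1]
          · simp [condDown, h0, h1w, h1]
        simp only [tallyLazy]
        rw [if_pos (by simp [h0]), hd, if_neg (by rw [if_pos (by simp [h0]), h, h1c]; simp)]
        rw [ih _ _ _ (Or.inr rfl)]
        rw [List.filter_cons_of_pos (by simp [hup]), List.filter_cons_of_neg (by simp [hdn])]
        simp only [Prod.mk.injEq, List.length_cons]
        constructor <;> push_cast <;> ring
    · by_cases h1 : eGet e 1 = w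
      · by_cases h2 : eGet e 0 ∈ ac
        · have h2c : ac.contains (eGet e 0) = true := by simpa [List.contains_iff_mem] using h2
          have hup : condUp ac w e = false := by simp [condUp, h0, h1, h2]
          have hdn : condDown ac w e = true := by simp [condDown, h0, h1, h2]
          simp only [tallyLazy]
          rw [if_pos (by simp [h0, h1]), hd, if_pos (by rw [if_neg (by simp [h0]), h, h2c])]
          rw [ih _ _ _ (Or.inr rfl)]
          rw [List.filter_cons_of_neg (by simp [hup]), List.filter_cons_of_pos (by simp [hdn])]
          simp only [Prod.mk.injEq, List.length_cons]
          constructor <;> push_cast <;> ring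
        · have h2c : ac.contains (eGet e 0) = false := by simpa [List.contains_iff_mem] using h2
          have hup : condUp ac w e = true := by simp [condUp, h0, h1, h2]
          have hdn : condDown ac w e = false := by simp [condDown, h0, h1, h2]
          simp only [tallyLazy]
          rw [if_pos (by simp [h0, h1]), hd, if_neg (by rw [if_neg (by simp [h0]), h, h2c]; simp)]
          rw [ih _ _ _ (Or.inr rfl)]
          rw [List.filter_cons_of_pos (by simp [hup]), List.filter_cons_of_neg (by simp [hdn])]
          simp only [Prod.mk.injEq, List.length_cons]
          constructor <;> push_cast <;> ring
      · have hup : condUp ac w e = false := by simp [condUp, h0, h1]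
        have hdn : condDown ac w e = false := by simp [condDown, h0, h1]
        simp only [tallyLazy]
        rw [if_neg (by simp [h0, h1])]
        rw [ih _ _ _ ho]
        rw [List.filter_cons_of_neg (by simp [hup]), List.filter_cons_of_neg (by simp [hdn])]

lemma dpA_eq_dpB (tes bes : List (List Int)) :
    ∀ (f : Nat) (u : Int), dpA tes bes f u = dpB tes bes f u := by
  intro f
  induction f with
  | zero => intro u; rfl
  | succ f ih =>
    intro u
    by_cases hu : u = 0
    · simp [dpA, dpB, hu]
    · have hcont : ∀ x,
          (PySem.Set.contains (descend tes u) x : Bool)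
            = (allChildren tes (tes.length + 1) u).contains x := by
        intro x
        rw [PySem.Set.contains_eq_listContains]
        exact contains_eq_of_mem_iff (fun y => desc_eq_ac u y) x
      have hst := foldl_tallyLazy hcont bes none 0 0 (Or.inl rfl)
      simp only [dpA, dpB, hu, beq_iff_eq, if_false]
      rw [congrArg Prod.fst hst, congrArg Prod.snd hst]
      simp [ih]

-- ===== VERDICT (by name: the statement is the Claim_ definition above) =====
theorem dp_spec : Claim_equal_dp := by
  intro graph u tree_edges back_edges _ _
  unfold Spec_dp dp dp_alt
  exact dpA_eq_dpB tree_edges back_edges (tree_edges.length + 1) u
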